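-- pv_equiv track=rewrite | github.com/jjhembd/groundwater | bedrock/description.py | compoundwords
-- ===== SOURCE A (Python) =====
-- def compoundwords(words):
--     compounds = ['sandstone', 'sandrock', 'watersand', 'quicksand',
--             'limestone', 'siltstone', 'claystone', 'redbed', 'redbeds',
--             'overburden', 'topsoil', 'subsoil', 'bedrock']
--     i = 0
--     while i < len(words) - 2:
--         separator = words[i + 1]
--         compound = words[i] + words[i + 2]
--         if separator == ' ' and compound in compounds:
--             words[i] = compound
--             del words[i + 1:i + 3] # Deletes indices i + 1 and i + 2, NOT i + 3
--         i += 1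
--
--     return words
-- ===== SOURCE B (Python) =====
-- def compoundwords(words):
--     compounds = ['sandstone', 'sandrock', 'watersand', 'quicksand',
--             'limestone', 'siltstone', 'claystone', 'redbed', 'redbeds',
--             'overburden', 'topsoil', 'subsoil', 'bedrock']
--     result = []
--     n = len(words)
--     j = 0
--     while j < n:
--         if j + 2 < n and words[j + 1] == ' ' and words[j] + words[j + 2] in compounds:
--             result.append(words[j] + words[j + 2])
--             j += 3
--         else:
--             result.append(words[j])
--             j += 1
--     words[:] = result
--     return words
-- ===== Notes on version B (the rewrite author's own statement) =====
-- stated objective: simpler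
-- what changed: Replaces A's in-place while-loop that overwrites words[i] and deletes two slots from the shrinking list per merge with a single forward pass over the fixed input that appends either the compound (consuming 3 items) or the current word (consuming 1) to a fresh result list, written back once via words[:] = result.
import Mathlib
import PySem

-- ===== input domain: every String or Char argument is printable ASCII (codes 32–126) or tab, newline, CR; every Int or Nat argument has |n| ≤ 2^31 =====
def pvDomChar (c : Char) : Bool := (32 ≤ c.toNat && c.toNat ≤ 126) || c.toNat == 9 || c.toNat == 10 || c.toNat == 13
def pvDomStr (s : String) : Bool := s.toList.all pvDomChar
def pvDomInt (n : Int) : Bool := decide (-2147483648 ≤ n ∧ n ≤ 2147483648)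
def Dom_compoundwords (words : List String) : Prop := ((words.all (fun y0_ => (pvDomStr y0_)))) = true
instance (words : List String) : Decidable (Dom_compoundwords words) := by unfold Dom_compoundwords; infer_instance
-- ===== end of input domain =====

-- B replaces A's in-place shrink-while-scanning loop (delete two slots per merge) by a single
-- forward pass over the fixed input that appends to a fresh result list (objective: simpler).
-- Both Pythons mutate `words` in place to the same final contents; equality proved is of the
-- returned value.

-- ===== PORT A =====
def compoundsA : List String :=
  ["sandstone", "sandrock", "watersand", "quicksand",
   "limestone", "siltstone", "claystone", "redbed", "redbeds",
   "overburden", "topsoil", "subsoil", "bedrock"]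

-- `while i < len(words) - 2`, with `words[i] = compound; del words[i+1:i+3]` on a merge
def loopA (ws : List String) (i : Nat) : List String :=
  if h : i + 2 < ws.length then
    let separator := ws[i + 1]
    let compound := ws[i]'(by omega) ++ ws[i + 2]
    if separator = " " ∧ compound ∈ compoundsA then
      let ws' := ws.set i compound
      loopA (ws'.take (i + 1) ++ ws'.drop (i + 3)) (i + 1)
    else
      loopA ws (i + 1)
  else
    ws
termination_by ws.length - i
decreasing_by
  · simp [List.length_take, List.length_drop, List.length_set]; omega
  · omega

def compoundwords (words : List String) : List String := loopA words 0

-- ===== PORT B =====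
def compoundsB : List String :=
  ["sandstone", "sandrock", "watersand", "quicksand",
   "limestone", "siltstone", "claystone", "redbed", "redbeds",
   "overburden", "topsoil", "subsoil", "bedrock"]

-- `while j < n:` building `result`; Source B's short-circuit `and`-chain is the nested guard
def loopB (ws : List String) (j : Nat) : List String :=
  if h : j < ws.length then
    if h2 : j + 2 < ws.length then
      if ws[j + 1] = " " ∧ ws[j]'(by omega) ++ ws[j + 2] ∈ compoundsB then
        (ws[j]'(by omega) ++ ws[j + 2]) :: loopB ws (j + 3)
      else
        ws[j] :: loopB ws (j + 1)
    else
      ws[j] :: loopB ws (j + 1)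
  else
    []
termination_by ws.length - j

def compoundwords_alt (words : List String) : List String := loopB words 0

-- ===== PRECONDITION & SPEC =====
def Spec_compoundwords (words : List String) (out : List String) : Prop := out = compoundwords_alt words
instance (words : List String) (out : List String) : Decidable (Spec_compoundwords words out) := by unfold Spec_compoundwords; infer_instance

-- ===== CLAIM (what is proved, stated in full; the proofs are below) =====
def Claim_equal_compoundwords : Prop := ∀ (words : List String), Dom_compoundwords words → Spec_compoundwords words (compoundwords words)

-- ===== LEMMAS AND PROOFS =====

-- reference function both loops are reduced to: structural one-pass merge over the suffix
def go : List String → List String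
  | a :: s :: b :: rest =>
      if s = " " ∧ a ++ b ∈ compoundsA then (a ++ b) :: go rest
      else a :: go (s :: b :: rest)
  | xs => xs

lemma go_short (xs : List String) (h : xs.length < 3) : go xs = xs := by
  match xs with
  | [] => rfl
  | [a] => rfl
  | [a, b] => rfl
  | a :: b :: c :: r => simp at h; omega

lemma drop_three (ws : List String) (i : Nat) (h : i + 2 < ws.length) :
    ws.drop i = ws[i]'(by omega) :: ws[i + 1]'(by omega) :: ws[i + 2]'h :: ws.drop (i + 3) := by
  rw [List.drop_eq_getElem_cons (by omega : i < ws.length),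
      List.drop_eq_getElem_cons (by omega : i + 1 < ws.length),
      List.drop_eq_getElem_cons (by omega : i + 2 < ws.length)]

lemma comps_eq : compoundsB = compoundsA := rfl

lemma loopA_eq (ws : List String) (i : Nat) :
    loopA ws i = ws.take i ++ go (ws.drop i) := by
  induction ws, i using loopA.induct with
  | case1 ws i h separator compound hc ws' ih =>
      rw [loopA]
      simp only [dif_pos h]
      rw [if_pos (show ws[i + 1] = " " ∧ ws[i]'(by omega) ++ ws[i + 2] ∈ compoundsA from hc)]
      rw [ih]
      have hlt : i < ws.length := by omega
      have hset : ws.set i (ws[i] ++ ws[i + 2]) =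
          ws.take i ++ (ws[i] ++ ws[i + 2]) :: ws.drop (i + 1) := by
        rw [List.set_eq_take_append_cons_drop, if_pos hlt]
      have hlen : (ws.take i).length = i := List.length_take_of_le (by omega)
      have htake : (ws.set i (ws[i] ++ ws[i + 2])).take (i + 1) =
          ws.take i ++ [ws[i] ++ ws[i + 2]] := by
        rw [hset, List.take_append, hlen]
        simp [List.take_of_length_le (by omega : (ws.take i).length ≤ i + 1)]
      have hdrop : (ws.set i (ws[i] ++ ws[i + 2])).drop (i + 3) = ws.drop (i + 3) := by
        rw [hset, List.drop_append, hlen]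
        rw [List.drop_eq_nil_of_le (by omega : (ws.take i).length ≤ i + 3)]
        simp [show i + 3 - i = 3 by omega, List.drop_drop]
      rw [htake, hdrop]
      have hlen2 : (ws.take i ++ [ws[i] ++ ws[i + 2]]).length = i + 1 := by simp [hlen]
      rw [List.take_append, List.drop_append, hlen2]
      simp only [List.take_of_length_le (le_of_eq hlen2), Nat.sub_self,
        List.take_zero, List.append_nil, List.drop_eq_nil_of_le (le_of_eq hlen2),
        List.drop_zero, List.nil_append]
      rw [drop_three ws i h, go, if_pos hc]
      simp
  | case2 ws i h separator compound hc ih =>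
      rw [loopA]
      simp only [dif_pos h]
      rw [if_neg (show ¬(ws[i + 1] = " " ∧ ws[i]'(by omega) ++ ws[i + 2] ∈ compoundsA) from hc)]
      rw [ih, drop_three ws i h, go, if_neg hc]
      rw [List.take_add_one, List.getElem?_eq_getElem (show i < ws.length by omega)]
      simp only [Option.toList_some, List.append_assoc, List.singleton_append]
      rw [List.drop_eq_getElem_cons (show i + 1 < ws.length by omega),
          List.drop_eq_getElem_cons (show i + 2 < ws.length by omega)]
  | case3 ws i h =>
      rw [loopA]
      simp only [dif_neg h]
      rw [go_short _ (by simp [List.length_drop]; omega)]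
      simp

lemma loopB_eq (ws : List String) (j : Nat) :
    loopB ws j = go (ws.drop j) := by
  induction j using loopB.induct (ws := ws) with
  | case1 j h h2 hc ih =>
      rw [loopB]
      simp only [dif_pos h, dif_pos h2, if_pos hc]
      rw [ih, drop_three ws j h2, go, if_pos (comps_eq ▸ hc)]
  | case2 j h h2 hc ih =>
      rw [loopB]
      simp only [dif_pos h, dif_pos h2, if_neg hc]
      rw [ih, drop_three ws j h2, go, if_neg (comps_eq ▸ hc)]
      rw [List.drop_eq_getElem_cons (by omega : j + 1 < ws.length),
          List.drop_eq_getElem_cons (by omega : j + 2 < ws.length)]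
  | case3 j h h2 ih =>
      rw [loopB]
      simp only [dif_pos h, dif_neg h2]
      rw [ih, go_short (ws.drop j) (by simp [List.length_drop]; omega),
          go_short (ws.drop (j + 1)) (by simp [List.length_drop]; omega)]
      rw [List.drop_eq_getElem_cons h]
  | case4 j h =>
      rw [loopB]
      simp only [dif_neg h]
      rw [List.drop_eq_nil_of_le (by omega : ws.length ≤ j)]
      rfl

-- ===== VERDICT (by name: the statement is the Claim_ definition above) =====
theorem compoundwords_spec : Claim_equal_compoundwords := by
  intro words _
  show compoundwords words = compoundwords_alt words
  unfold compoundwords compoundwords_alt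
  rw [loopA_eq, loopB_eq]
  simp
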